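-- pv_equiv track=rewrite | github.com/filippopelloia/dark-signal-telegram-rpg | game/npcs.py | get_npc_trust_label
-- ===== SOURCE A (Python) =====
-- def get_npc_trust_label(trust_score: int, lang: str) -> str:
--     labels = {
--         "en": {0: "Hostile", 20: "Suspicious", 40: "Neutral", 60: "Friendly", 80: "Loyal"},
--         "it": {0: "Ostile", 20: "Sospettoso", 40: "Neutrale", 60: "Amichevole", 80: "Leale"},
--         "es": {0: "Hostil", 20: "Sospechoso", 40: "Neutral", 60: "Amigable", 80: "Leal"}
--     }
--     lang_labels = labels.get(lang, labels["en"])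
--
--     for threshold in sorted(lang_labels.keys(), reverse=True):
--         if trust_score >= threshold:
--             return lang_labels[threshold]
--     return lang_labels[0]
-- ===== SOURCE B (Python) =====
-- LABELS = {
--     "en": ["Hostile", "Suspicious", "Neutral", "Friendly", "Loyal"],
--     "it": ["Ostile", "Sospettoso", "Neutrale", "Amichevole", "Leale"],
--     "es": ["Hostil", "Sospechoso", "Neutral", "Amigable", "Leal"],
-- }
--
--
-- def get_npc_trust_label(trust_score: int, lang: str) -> str:
--     names = LABELS.get(lang, LABELS["en"])
--     return names[max(0, min(trust_score // 20, 4))]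
-- ===== Notes on version B (the rewrite author's own statement) =====
-- stated objective: idiomatic
-- what changed: Replaces the descending sort-keys-and-compare loop over a per-language dict with a per-language ordered label list indexed directly by the clamped closed-form index max(0, min(trust_score // 20, 4)).
import Mathlib
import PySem

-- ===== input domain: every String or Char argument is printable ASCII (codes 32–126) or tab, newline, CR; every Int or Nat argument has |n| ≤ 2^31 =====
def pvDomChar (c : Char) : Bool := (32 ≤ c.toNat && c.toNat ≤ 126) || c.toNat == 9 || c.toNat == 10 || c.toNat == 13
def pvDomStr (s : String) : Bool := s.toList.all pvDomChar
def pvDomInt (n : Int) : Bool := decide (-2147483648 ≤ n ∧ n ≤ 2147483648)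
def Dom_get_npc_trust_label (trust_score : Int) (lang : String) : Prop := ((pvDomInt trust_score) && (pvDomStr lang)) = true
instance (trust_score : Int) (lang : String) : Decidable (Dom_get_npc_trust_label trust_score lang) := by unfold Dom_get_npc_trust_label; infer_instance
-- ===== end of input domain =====

-- B replaces A's descending threshold loop over a per-language dict with a direct
-- clamped-index lookup into an ordered label list (idiomatic; no speed claim).

-- ===== PORT A =====
-- the three per-language dict literals of A (dict literal = successive inserts)
def pvEnDict : PySem.Dict Int String :=
  ((((PySem.Dict.empty.insert 0 "Hostile").insert 20 "Suspicious").insert 40 "Neutral").insert 60 "Friendly").insert 80 "Loyal"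
def pvItDict : PySem.Dict Int String :=
  ((((PySem.Dict.empty.insert 0 "Ostile").insert 20 "Sospettoso").insert 40 "Neutrale").insert 60 "Amichevole").insert 80 "Leale"
def pvEsDict : PySem.Dict Int String :=
  ((((PySem.Dict.empty.insert 0 "Hostil").insert 20 "Sospechoso").insert 40 "Neutral").insert 60 "Amigable").insert 80 "Leal"

-- the for-loop over the descending thresholds; after the loop: return lang_labels[0]
def pvLoopA (trust_score : Int) (d : PySem.Dict Int String) : List Int → String
  | [] => (d.get? 0).getD ""            -- lang_labels[0]; key 0 is always present
  | t :: rest =>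
      if trust_score ≥ t then (d.get? t).getD ""   -- lang_labels[threshold]; key present
      else pvLoopA trust_score d rest

def get_npc_trust_label (trust_score : Int) (lang : String) : String :=
  let labels : PySem.Dict String (PySem.Dict Int String) :=
    ((PySem.Dict.empty.insert "en" pvEnDict).insert "it" pvItDict).insert "es" pvEsDict
  let lang_labels := (labels.get? lang).getD pvEnDict
  pvLoopA trust_score lang_labels (PySem.List.sorted lang_labels.keys (fun x => x) true)

-- ===== PORT B =====
def pvEnList : List String := ["Hostile", "Suspicious", "Neutral", "Friendly", "Loyal"]
def pvItList : List String := ["Ostile", "Sospettoso", "Neutrale", "Amichevole", "Leale"]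
def pvEsList : List String := ["Hostil", "Sospechoso", "Neutral", "Amigable", "Leal"]

def get_npc_trust_label_alt (trust_score : Int) (lang : String) : String :=
  let table : PySem.Dict String (List String) :=
    ((PySem.Dict.empty.insert "en" pvEnList).insert "it" pvItList).insert "es" pvEsList
  let names := (table.get? lang).getD pvEnList
  (PySem.List.pyGet? names (max 0 (min (PySem.Int.floordiv trust_score 20) 4))).getD ""

-- ===== PRECONDITION & SPEC =====
def Spec_get_npc_trust_label (trust_score : Int) (lang : String) (out : String) : Prop := out = get_npc_trust_label_alt trust_score lang
instance (trust_score : Int) (lang : String) (out : String) : Decidable (Spec_get_npc_trust_label trust_score lang out) := by unfold Spec_get_npc_trust_label; infer_instance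

-- ===== CLAIM (what is proved, stated in full; the proofs are below) =====
def Claim_equal_get_npc_trust_label : Prop := ∀ (trust_score : Int) (lang : String), Dom_get_npc_trust_label trust_score lang → Spec_get_npc_trust_label trust_score lang (get_npc_trust_label trust_score lang)

-- ===== LEMMAS AND PROOFS =====

-- one language table: the loop over [80,60,40,20,0] equals the clamped-index lookup
theorem pv_table (s : Int) (l0 l1 l2 l3 l4 : String) :
    pvLoopA s (((((PySem.Dict.empty.insert 0 l0).insert 20 l1).insert 40 l2).insert 60 l3).insert 80 l4)
        (PySem.List.sorted
          (((((PySem.Dict.empty.insert 0 l0).insert 20 l1).insert 40 l2).insert 60 l3).insert 80 l4).keys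
          (fun x => x) true)
      = (PySem.List.pyGet? [l0, l1, l2, l3, l4] (max 0 (min (PySem.Int.floordiv s 20) 4))).getD "" := by
  have hkeys : ((((((PySem.Dict.empty.insert 0 l0).insert 20 l1).insert 40 l2).insert 60 l3).insert 80 l4 : PySem.Dict Int String)).keys
      = [0, 20, 40, 60, 80] := by
    simp [PySem.Dict.keys_insert_of_not_contains, PySem.Dict.contains_insert,
      PySem.Dict.contains_empty, PySem.Dict.keys_empty]
  rw [hkeys, show PySem.List.sorted ([0, 20, 40, 60, 80] : List Int) (fun x => x) true
      = [80, 60, 40, 20, 0] from by decide,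
    PySem.Int.floordiv_eq_ediv_of_pos (by norm_num : (0:Int) < 20)]
  by_cases h80 : 80 ≤ s
  · have hi : max 0 (min (s / 20) 4) = 4 := by omega
    rw [hi]
    simp [pvLoopA, PySem.Dict.get?_insert_self, h80, PySem.List.pyGet?, PySem.List.pyIdx?]
  · by_cases h60 : 60 ≤ s
    · have hi : max 0 (min (s / 20) 4) = 3 := by omega
      rw [hi]
      simp [pvLoopA, PySem.Dict.get?_insert, h80, h60, PySem.List.pyGet?, PySem.List.pyIdx?]
    · by_cases h40 : 40 ≤ s
      · have hi : max 0 (min (s / 20) 4) = 2 := by omega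
        rw [hi]
        simp [pvLoopA, PySem.Dict.get?_insert, h80, h60, h40, PySem.List.pyGet?, PySem.List.pyIdx?]
      · by_cases h20 : 20 ≤ s
        · have hi : max 0 (min (s / 20) 4) = 1 := by omega
          rw [hi]
          simp [pvLoopA, PySem.Dict.get?_insert, h80, h60, h40, h20, PySem.List.pyGet?, PySem.List.pyIdx?]
        · by_cases h0 : 0 ≤ s
          · have hi : max 0 (min (s / 20) 4) = 0 := by omega
            rw [hi]
            simp [pvLoopA, PySem.Dict.get?_insert, h80, h60, h40, h20, h0, PySem.List.pyGet?, PySem.List.pyIdx?]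
          · have hi : max 0 (min (s / 20) 4) = 0 := by omega
            rw [hi]
            simp [pvLoopA, PySem.Dict.get?_insert, h80, h60, h40, h20, h0, PySem.List.pyGet?, PySem.List.pyIdx?]

-- ===== VERDICT (by name: the statement is the Claim_ definition above) =====
theorem get_npc_trust_label_spec : Claim_equal_get_npc_trust_label := by
  intro s lang _
  unfold Spec_get_npc_trust_label get_npc_trust_label get_npc_trust_label_alt
  by_cases hes : lang = "es"
  · subst hes
    simpa [PySem.Dict.get?_insert, pvEsDict, pvEsList] using
      pv_table s "Hostil" "Sospechoso" "Neutral" "Amigable" "Leal"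
  · by_cases hit : lang = "it"
    · subst hit
      simpa [PySem.Dict.get?_insert, pvItDict, pvItList] using
        pv_table s "Ostile" "Sospettoso" "Neutrale" "Amichevole" "Leale"
    · by_cases hen : lang = "en"
      · subst hen
        simpa [PySem.Dict.get?_insert, pvEnDict, pvEnList] using
          pv_table s "Hostile" "Suspicious" "Neutral" "Friendly" "Loyal"
      · simpa [PySem.Dict.get?_insert, hes, hit, hen, pvEnDict, pvEnList] using
          pv_table s "Hostile" "Suspicious" "Neutral" "Friendly" "Loyal"
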